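-- pv_equiv track=rewrite | github.com/dansuh17/dansuh_algorithms | python/oncoder_9/one.py | solution
-- ===== SOURCE A (Python) =====
-- def solution(T, requiredTime):
--     req_time_sorted = sorted(requiredTime)
--
--     can_solve = []
--     total_time = 0
--     for t in req_time_sorted:
--         total_time += t
--         if total_time > T:
--             break
--         can_solve.append(t)
--
--     num_correct = len(can_solve)
--     used_time = 0
--     deduce_points = 0
--     for t in can_solve:
--         used_time += t
--         deduce_points += used_time
--     return [num_correct, deduce_points]
-- ===== SOURCE B (Python) =====
-- def solution(T, requiredTime):
--     # Selection-style greedy: no sort. Repeatedly extract the minimum of the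
--     # remaining pool while it still fits in T, accumulating count, elapsed
--     # time and penalty in one loop.
--     remaining = list(requiredTime)
--     total = 0
--     count = 0
--     penalty = 0
--     while remaining:
--         m = min(remaining)
--         if total + m > T:
--             break
--         remaining.remove(m)
--         total += m
--         count += 1
--         penalty += total
--     return [count, penalty]
-- ===== Notes on version B (the rewrite author's own statement) =====
-- stated objective: alternative
-- what changed: B drops the sort entirely: it repeatedly extracts the minimum from the remaining pool (selection-style) and accumulates count and penalty in a single loop, instead of A's sort followed by two staged accumulator loops.
import Mathlib
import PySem

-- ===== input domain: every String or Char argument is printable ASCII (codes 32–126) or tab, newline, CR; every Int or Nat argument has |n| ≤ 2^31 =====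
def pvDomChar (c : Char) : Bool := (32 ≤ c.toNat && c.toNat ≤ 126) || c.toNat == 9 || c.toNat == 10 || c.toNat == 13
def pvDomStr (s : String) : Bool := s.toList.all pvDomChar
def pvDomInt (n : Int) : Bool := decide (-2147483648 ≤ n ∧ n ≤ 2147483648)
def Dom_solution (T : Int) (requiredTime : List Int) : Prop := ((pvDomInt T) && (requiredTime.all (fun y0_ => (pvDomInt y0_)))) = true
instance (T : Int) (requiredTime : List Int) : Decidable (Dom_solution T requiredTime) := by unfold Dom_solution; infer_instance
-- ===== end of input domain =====

-- B replaces A's sort + two staged accumulator loops by a sort-free selection-style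
-- greedy: repeated min-extraction from the remaining pool with one combined
-- accumulator loop (objective: alternative algorithm).


-- ===== PORT A =====
-- first loop of A: accumulate total_time, break when > T, else append t to can_solve
def solutionLoopA (T : Int) : List Int → Int → List Int → List Int
  | [], _, acc => acc
  | t :: rest, total, acc =>
      if total + t > T then acc
      else solutionLoopA T rest (total + t) (acc ++ [t])

def solution (T : Int) (requiredTime : List Int) : List Int :=
  let reqTimeSorted := PySem.List.sorted requiredTime (fun x => x) false
  let canSolve := solutionLoopA T reqTimeSorted 0 []
  let numCorrect : Int := canSolve.length
  -- second loop of A: used_time/deduce_points accumulators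
  let ud := canSolve.foldl (fun (p : Int × Int) t => (p.1 + t, p.2 + (p.1 + t))) (0, 0)
  [numCorrect, ud.2]

-- ===== PORT B =====
-- Source B's while loop: m = min(remaining); break if total+m > T; remaining.remove(m)
-- (remove of the minimum is exactly List.erase: PySem.List.remove?_eq_some_erase
-- gives remove? remaining m = some (remaining.erase m) since m ∈ remaining).
def solveB (T : Int) (remaining : List Int) (total count pen : Int) : List Int :=
  match h : PySem.List.min? remaining (fun x => x) with
  | none => [count, pen]
  | some m =>
      if total + m > T then [count, pen]
      else solveB T (remaining.erase m) (total + m) (count + 1) (pen + (total + m))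
termination_by remaining.length
decreasing_by
  rw [List.length_erase_of_mem (PySem.List.min?_mem h)]
  exact Nat.sub_lt (List.length_pos_of_mem (PySem.List.min?_mem h)) one_pos

def solution_alt (T : Int) (requiredTime : List Int) : List Int :=
  solveB T requiredTime 0 0 0

-- ===== PRECONDITION & SPEC =====
def Spec_solution (T : Int) (requiredTime : List Int) (out : List Int) : Prop := out = solution_alt T requiredTime
instance (T : Int) (requiredTime : List Int) (out : List Int) : Decidable (Spec_solution T requiredTime out) := by unfold Spec_solution; infer_instance

-- ===== CLAIM =====
def Claim_equal_solution : Prop := ∀ (T : Int) (requiredTime : List Int), Dom_solution T requiredTime → Spec_solution T requiredTime (solution T requiredTime)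

-- ===== LEMMAS AND PROOFS =====

-- the accumulator of A's first loop only collects on the right
theorem solutionLoopA_acc (T : Int) (s : List Int) (total : Int) (acc : List Int) :
    solutionLoopA T s total acc = acc ++ solutionLoopA T s total [] := by
  induction s generalizing total acc with
  | nil => simp [solutionLoopA]
  | cons t rest ih =>
      simp only [solutionLoopA]
      split_ifs with h
      · simp
      · rw [ih (total + t) (acc ++ [t]), ih (total + t) ([] ++ [t])]
        simp

-- sorting puts the first minimum in front, the sorted rest behind it
theorem sorted_eq_min_cons (rem : List Int) (m : Int)
    (h : PySem.List.min? rem (fun x => x) = some m) :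
    PySem.List.sorted rem (fun x => x) false
      = m :: PySem.List.sorted (rem.erase m) (fun x => x) false := by
  have hmem : m ∈ rem := PySem.List.min?_mem h
  apply PySem.List.sorted_id_eq_of_perm_of_pairwise
  · exact ((PySem.List.sorted_perm _ _ _).cons m).trans (List.perm_cons_erase hmem).symm
  · refine List.Pairwise.cons ?_ (PySem.List.sorted_pairwise _ _)
    intro y hy
    have : y ∈ rem.erase m := (PySem.List.mem_sorted _ _ _ _).1 hy
    exact PySem.List.min?_isMin h y (List.mem_of_mem_erase this)

-- B's single loop equals A's staged pipeline, generalized over the accumulators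
theorem solveB_eq (T : Int) (rem : List Int) (total count pen : Int) :
    solveB T rem total count pen =
      let cs := solutionLoopA T (PySem.List.sorted rem (fun x => x) false) total []
      [count + cs.length, (cs.foldl (fun (p : Int × Int) t => (p.1 + t, p.2 + (p.1 + t))) (total, pen)).2] := by
  induction hn : rem.length using Nat.strong_induction_on generalizing rem total count pen with
  | _ n ih =>
  rw [solveB]
  split
  case _ hm =>
      have : rem = [] := (PySem.List.min?_eq_none_iff _ _).1 hm
      subst this
      simp [solutionLoopA, PySem.List.sorted]
  case _ m hm =>
      have hmem : m ∈ rem := PySem.List.min?_mem hm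
      rw [sorted_eq_min_cons rem m hm]
      split_ifs with h
      · simp [solutionLoopA, h]
      · have hlt : (rem.erase m).length < n := by
          rw [← hn, List.length_erase_of_mem hmem]
          exact Nat.sub_lt (List.length_pos_of_mem hmem) one_pos
        rw [ih _ hlt _ _ _ _ rfl]
        simp only [solutionLoopA]
        rw [if_neg h, solutionLoopA_acc T _ (total + m) ([] ++ [m])]
        simp only [List.length_cons, List.nil_append, List.singleton_append,
          List.foldl_cons, List.cons.injEq, and_true]
        push_cast
        ring

-- ===== VERDICT =====
theorem solution_spec : Claim_equal_solution := by
  intro T requiredTime _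
  unfold Spec_solution
  simp only [solution, solution_alt]
  rw [solveB_eq]
  simp
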